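-- pv_equiv track=rewrite | github.com/epi4mack/CustomInterpreter | interpreter.py | index_shift
-- ===== SOURCE A (Python) =====
-- def index_shift(raw_text: str,
--                 single_index: int) -> str:  # Переводит единосимвольный индекс в индекс вида "строка.колонна"
--     lst = list(raw_text)
--     new = []
--
--     row = 1
--     column = 0
--     for i, part in enumerate(lst):
--         if i < single_index: new.append(part)
--
--     row += new.count("\n")
--
--     for part in new:
--         if part == "\n":
--             column = 0
--         else:
--             column += 1
--
--     return f"{row}.{column}"
-- ===== SOURCE B (Python) =====
-- def index_shift(raw_text: str,
--                 single_index: int) -> str: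
--     prefix = raw_text[:max(0, single_index)]
--     row = prefix.count("\n") + 1
--     column = len(prefix) - (prefix.rfind("\n") + 1)
--     return f"{row}.{column}"
-- ===== Notes on version B (the rewrite author's own statement) =====
-- stated objective: simpler
-- what changed: Replaces A's three passes (index-filtered copy loop, count pass, column-reset loop) with a clamped slice plus str.count and str.rfind, no explicit Python loops.
import Mathlib
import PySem

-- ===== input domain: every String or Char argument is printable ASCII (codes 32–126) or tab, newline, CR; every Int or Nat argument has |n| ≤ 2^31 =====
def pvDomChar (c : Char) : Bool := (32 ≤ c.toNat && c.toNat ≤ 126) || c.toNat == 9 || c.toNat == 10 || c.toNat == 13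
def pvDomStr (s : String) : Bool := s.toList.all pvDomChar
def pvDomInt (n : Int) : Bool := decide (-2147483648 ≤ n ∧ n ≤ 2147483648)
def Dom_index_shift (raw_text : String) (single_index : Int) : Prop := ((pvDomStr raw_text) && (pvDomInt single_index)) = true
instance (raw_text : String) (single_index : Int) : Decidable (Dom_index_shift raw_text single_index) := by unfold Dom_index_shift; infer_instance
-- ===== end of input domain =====

-- B computes the row.column position with a clamped slice, str.count and str.rfind instead of
-- A's three explicit passes (index-filtered copy, count pass, column-reset loop); objective: simpler.

-- ===== PORT A =====
def index_shift (raw_text : String) (single_index : Int) : String :=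
  let lst := raw_text.toList
  let new : List Char := (PySem.List.enumerate lst).foldl
    (fun acc p => if p.1 < single_index then acc ++ [p.2] else acc) []
  let row : Int := 1 + (PySem.List.count new '\n' : Int)
  let column : Int := new.foldl (fun c part => if part == '\n' then (0 : Int) else c + 1) 0
  PySem.Int.toStr row ++ "." ++ PySem.Int.toStr column

-- ===== PORT B =====
def index_shift_alt (raw_text : String) (single_index : Int) : String :=
  let pfx := PySem.Str.slice raw_text none (some (max 0 single_index))
  let row : Int := (PySem.Str.count pfx "\n" : Int) + 1
  let column : Int := PySem.Str.len pfx - (PySem.Str.rfind pfx "\n" + 1)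
  PySem.Int.toStr row ++ "." ++ PySem.Int.toStr column

-- ===== PRECONDITION & SPEC =====
def Spec_index_shift (raw_text : String) (single_index : Int) (out : String) : Prop := out = index_shift_alt raw_text single_index
instance (raw_text : String) (single_index : Int) (out : String) : Decidable (Spec_index_shift raw_text single_index out) := by unfold Spec_index_shift; infer_instance

-- ===== CLAIM (what is proved, stated in full; the proofs are below) =====
def Claim_equal_index_shift : Prop := ∀ (raw_text : String) (single_index : Int), Dom_index_shift raw_text single_index → Spec_index_shift raw_text single_index (index_shift raw_text single_index)

-- ===== LEMMAS AND PROOFS =====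

-- A's first loop builds exactly the prefix of length (si - start clamped at 0).
theorem lem_enum_take {α : Type} (cs : List α) (si : Int) : ∀ (start : Int) (acc : List α),
    (PySem.List.enumerate cs start).foldl
      (fun acc p => if p.1 < si then acc ++ [p.2] else acc) acc
    = acc ++ cs.take (si - start).toNat := by
  induction cs with
  | nil => intro start acc; simp [PySem.List.enumerate]
  | cons c t ih =>
    intro start acc
    simp only [PySem.List.enumerate, List.foldl_cons]
    by_cases h : start < si
    · have h1 : (si - start).toNat = (si - (start + 1)).toNat + 1 := by omega
      simp [h, ih (start + 1) (acc ++ [c]), h1]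
    · have h0 : (si - start).toNat = 0 := by omega
      have h2 : (si - (start + 1)).toNat = 0 := by omega
      simp [h, ih (start + 1) acc, h0, h2]

-- single-char isPrefixOf is a head test
theorem lem_isPrefix_single (c h : Char) (t : List Char) :
    List.isPrefixOf [c] (h :: t) = (c == h) := by
  simp [List.isPrefixOf]

-- Python count of a single character equals List.count
theorem lem_count_go (c : Char) : ∀ (fuel : Nat) (cs : List Char) (acc : Nat),
    cs.length ≤ fuel →
    PySem.Chars.count.go [c] fuel cs acc = acc + cs.count c := by
  intro fuel
  induction fuel with
  | zero =>
    intro cs acc h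
    have : cs = [] := by cases cs <;> simp_all
    subst this; simp [PySem.Chars.count.go]
  | succ n ih =>
    intro cs acc h
    cases cs with
    | nil => simp [PySem.Chars.count.go]
    | cons x t =>
      rw [PySem.Chars.count.go]
      by_cases hx : c = x
      · subst hx
        simp only [lem_isPrefix_single, BEq.rfl, if_true, List.length_cons, List.drop_succ_cons,
          List.length_nil, List.drop_zero]
        rw [ih t (acc + 1) (by simpa using Nat.lt_succ_iff.mp (by simpa using h))]
        simp
        omega
      · have : ([c].isPrefixOf (x :: t)) = false := by
          simp [lem_isPrefix_single]; exact hx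
        simp only [this]
        rw [ih t acc (by simpa using Nat.lt_succ_iff.mp (by simpa using h))]
        simp only [List.count_cons]
        have : (x == c) = false := by simpa using fun h => hx h.symm
        simp [this]

theorem lem_count (cs : List Char) (c : Char) :
    PySem.Chars.count cs [c] = cs.count c := by
  rw [PySem.Chars.count]
  simp only [List.isEmpty_cons, if_false, Bool.false_eq_true]
  simpa using lem_count_go c cs.length cs 0 (le_refl _)

-- rfind.go ignores a final appended element below the old length
theorem lem_rfind_go_append (cs : List Char) (x c : Char) : ∀ (j : Nat), j < cs.length →
    PySem.Chars.rfind.go (cs ++ [x]) [c] j = PySem.Chars.rfind.go cs [c] j := by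
  intro j
  induction j with
  | zero =>
    intro h
    cases cs with
    | nil => simp at h
    | cons y t =>
      rw [PySem.Chars.rfind.go, PySem.Chars.rfind.go]
      simp [lem_isPrefix_single]
  | succ n ih =>
    intro h
    rw [PySem.Chars.rfind.go, PySem.Chars.rfind.go]
    have hdrop : List.drop (n + 1) (cs ++ [x]) = List.drop (n + 1) cs ++ [x] := by
      rw [List.drop_append_of_le_length (by omega)]
    have hne : List.drop (n + 1) cs ≠ [] := by
      simp [List.drop_eq_nil_iff]; omega
    obtain ⟨y, t, hyt⟩ := List.exists_cons_of_ne_nil hne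
    rw [hdrop, hyt]
    simp only [List.cons_append, lem_isPrefix_single]
    rw [ih (by omega)]

-- rfind over an appended element
theorem lem_rfind_append (cs : List Char) (x c : Char) :
    PySem.Chars.rfind (cs ++ [x]) [c] =
      if x = c then (cs.length : Int) else PySem.Chars.rfind cs [c] := by
  have hlen : (cs ++ [x]).length = cs.length + 1 := by simp
  rw [PySem.Chars.rfind, hlen, PySem.Chars.rfind.go]
  have hd : List.drop (cs.length + 1) (cs ++ [x]) = [] := by
    simp
  rw [hd]
  simp only [List.isPrefixOf, Bool.false_eq_true, if_false]
  -- now at go (cs ++ [x]) [c] cs.length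
  cases hcs : cs.length with
  | zero =>
    have : cs = [] := List.length_eq_zero_iff.mp hcs
    subst this
    rw [PySem.Chars.rfind.go]
    simp only [List.nil_append, lem_isPrefix_single, PySem.Chars.rfind,
      List.length_nil]
    rw [PySem.Chars.rfind.go]
    simp only [List.isPrefixOf]
    by_cases hx : x = c
    · subst hx; simp
    · have : (c == x) = false := by
        simp only [beq_eq_false_iff_ne, ne_eq]
        exact fun h => hx h.symm
      simp [this, hx]
  | succ m =>
    rw [PySem.Chars.rfind.go]
    have hdm : List.drop (m + 1) (cs ++ [x]) = [x] := by
      rw [List.drop_append_of_le_length (by omega)]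
      have : List.drop (m + 1) cs = [] := by simp; omega
      simp [this]
    rw [hdm, lem_isPrefix_single]
    by_cases hx : x = c
    · subst hx; simp
    · have hb : (c == x) = false := by
        simp only [beq_eq_false_iff_ne, ne_eq]; exact fun h => hx h.symm
      simp only [hb, Bool.false_eq_true, if_false]
      rw [lem_rfind_go_append cs x c m (by omega)]
      -- rfind cs [c] = go cs [c] cs.length = go cs [c] m (the top step fails: drop (m+1) cs = [])
      rw [PySem.Chars.rfind, hcs, PySem.Chars.rfind.go]
      have : List.drop (m + 1) cs = [] := by simp [List.drop_eq_nil_iff]; omega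
      rw [this]
      simp [List.isPrefixOf, hx]

-- A's column loop computes length-after-last-newline, which rfind expresses directly
theorem lem_column (cs : List Char) :
    cs.foldl (fun col part => if part == '\n' then (0 : Int) else col + 1) 0
    = (cs.length : Int) - (PySem.Chars.rfind cs ['\n'] + 1) := by
  induction cs using List.reverseRecOn with
  | nil =>
    simp [PySem.Chars.rfind]
    rw [PySem.Chars.rfind.go]
    simp [List.isPrefixOf]
  | append_singleton t x ih =>
    rw [List.foldl_append, List.foldl_cons, List.foldl_nil]
    rw [lem_rfind_append t x '\n']
    by_cases hx : x = '\n'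
    · subst hx; simp
    · have hb : (x == '\n') = false := by simpa using hx
      have hle : PySem.Chars.rfind t ['\n'] ≤ (t.length : Int) := by
        rw [PySem.Chars.rfind]
        generalize t.length = n
        induction n with
        | zero => rw [PySem.Chars.rfind.go]; split <;> simp
        | succ m ihm =>
          rw [PySem.Chars.rfind.go]
          split
          · omega
          · omega
      simp only [hb, Bool.false_eq_true, if_false, hx]
      rw [ih]
      simp only [List.length_append, List.length_cons, List.length_nil]
      push_cast
      ring

-- ===== VERDICT (by name: the statement is the Claim_ definition above) =====
theorem index_shift_spec : Claim_equal_index_shift := by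
  intro raw_text single_index _
  unfold Spec_index_shift index_shift index_shift_alt
  have hnl : ("\n" : String).toList = ['\n'] := rfl
  have hpfx : (PySem.Str.slice raw_text none (some (max 0 single_index))).toList
      = raw_text.toList.take single_index.toNat := by
    have hmax : (max 0 single_index).toNat = single_index.toNat := by omega
    simp [PySem.Str.slice, PySem.Chars.slice,
      PySem.List.slice_to raw_text.toList (le_max_left 0 single_index), hmax]
  have hnew := lem_enum_take raw_text.toList single_index 0 []
  simp only [List.nil_append, sub_zero] at hnew
  simp only [hnew, hpfx, hnl, PySem.Str.count_eq, PySem.Str.rfind_eq, PySem.Str.len,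
    lem_count, PySem.List.count_eq, lem_column]
  rw [Int.add_comm]
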